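-- pv_equiv track=rewrite | github.com/bobbyinvents/one-liner-challenges | beginner-codes/490/full_solution.py | maximum_seating
-- ===== SOURCE A (Python) =====
-- def fill_open_seats(seats: list[int], open_seats: list[int]) -> list[int]:
--     if not open_seats:
--         return [seats.count(1)]
--
--     new_seats = [i for i in seats]
--     new_seats[open_seats[0]] = 1
--     new_open_seats = [
--         i
--         for i in range(len(new_seats))
--         if new_seats[i] == 0 and 1 not in new_seats[max(0, i - 2) : i + 3]
--     ]
--
--     return fill_open_seats(seats, open_seats[1:]) + fill_open_seats(
--         new_seats, new_open_seats
--     )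
--
-- def maximum_seating(seats: list[int]) -> int:
--     open_seats = [
--         i
--         for i in range(len(seats))
--         if seats[i] == 0 and 1 not in seats[max(0, i - 2) : i + 3]
--     ]
--     max_seats = fill_open_seats(seats, open_seats)
--     return max(max_seats) - seats.count(1)
-- ===== SOURCE B (Python) =====
-- def maximum_seating(seats: list[int]) -> int:
--     count = 0
--     last = -3  # index of the most recently placed extra seat
--     for i in range(len(seats)):
--         if seats[i] == 0 and 1 not in seats[max(0, i - 2):i + 3] and i - last >= 3:
--             count += 1
--             last = i
--     return count
-- ===== Notes on version B (the rewrite author's own statement) =====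
-- stated objective: alternative
-- what changed: Replaced the branch-and-bound recursion that enumerates all placement orders and takes the maximum by a single left-to-right greedy pass that places a seat whenever the position is open and at least 3 away from the last placed seat (proved to attain the same maximum).
import Mathlib
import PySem

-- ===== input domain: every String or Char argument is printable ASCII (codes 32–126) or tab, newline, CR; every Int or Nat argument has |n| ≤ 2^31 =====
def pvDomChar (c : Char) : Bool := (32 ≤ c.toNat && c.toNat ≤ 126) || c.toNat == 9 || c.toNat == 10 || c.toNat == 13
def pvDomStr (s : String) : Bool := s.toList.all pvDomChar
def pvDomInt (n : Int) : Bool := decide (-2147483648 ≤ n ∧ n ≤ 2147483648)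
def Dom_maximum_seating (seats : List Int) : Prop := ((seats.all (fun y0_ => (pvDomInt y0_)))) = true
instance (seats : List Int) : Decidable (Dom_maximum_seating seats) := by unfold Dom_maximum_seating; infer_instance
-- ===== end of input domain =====

-- B replaces A's branch-and-bound recursion over all placement orders by one left-to-right
-- greedy pass that provably attains the same maximum (objective: alternative algorithm).

-- ===== PORT A =====
-- shared helper: the open-seat test 'seats[i] == 0 and 1 not in seats[max(0, i-2) : i+3]'
-- (appears verbatim in both Pythons)
def openCond (s : List Int) (i : Int) : Bool :=
  (PySem.List.pyGetD s i 1 == 0) &&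
  !((PySem.List.slice s (some (max 0 (i - 2))) (some (i + 3))).contains 1)

-- '[i for i in range(len(s)) if <openCond>]'
def openListOf (s : List Int) : List Int :=
  (PySem.List.pyRange 0 (PySem.List.len s) 1).filter (fun i => openCond s i)

-- fill_open_seats, made total with fuel; the top call supplies fuel (n+2)^2, which is
-- strictly more than the recursion depth (each call either shortens open_seats or adds a 1).
def fillOpen : Nat → List Int → List Int → List Int
  | 0, _, _ => []
  | fuel + 1, seats, openS =>
    match openS with
    | [] => [PySem.List.count seats 1]
    | o :: rest =>
      let newSeats := PySem.List.pySetD seats o 1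
      let newOpen := openListOf newSeats
      fillOpen fuel seats rest ++ fillOpen fuel newSeats newOpen

def maximum_seating (seats : List Int) : Int :=
  let openS := openListOf seats
  let maxSeats := fillOpen ((seats.length + 2) * (seats.length + 2)) seats openS
  (PySem.List.max? maxSeats (fun x => x)).getD 0 - PySem.List.count seats 1

-- ===== PORT B =====
def maximum_seating_alt (seats : List Int) : Int :=
  ((PySem.List.pyRange 0 (PySem.List.len seats) 1).foldl
    (fun (st : Int × Int) i =>
      if openCond seats i && decide (3 ≤ i - st.2) then (st.1 + 1, i) else st)
    (0, -3)).1

-- ===== PRECONDITION & SPEC =====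
def Spec_maximum_seating (seats : List Int) (out : Int) : Prop := out = maximum_seating_alt seats
instance (seats : List Int) (out : Int) : Decidable (Spec_maximum_seating seats out) := by unfold Spec_maximum_seating; infer_instance

-- ===== CLAIM (what is proved, stated in full; the proofs are below) =====
def Claim_equal_maximum_seating : Prop := ∀ (seats : List Int), Dom_maximum_seating seats → Spec_maximum_seating seats (maximum_seating seats)

-- ===== LEMMAS AND PROOFS =====

-- greedy count on a (sorted) list of open positions: take the head, drop everything closer than 3
def greedy : List Int → Int
  | [] => 0
  | h :: t => 1 + greedy (t.filter (fun i => h + 3 ≤ i))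
termination_by L => L.length
decreasing_by simpa using Nat.lt_succ_of_le ((List.length_filter_le _ t.attach).trans (by simp))

-- positions compatible with a seat placed at o
def farB (o i : Int) : Bool := decide (i + 3 ≤ o ∨ o + 3 ≤ i)

theorem greedy_nonneg_aux : ∀ (n : Nat) (L : List Int), L.length ≤ n → 0 ≤ greedy L := by
  intro n
  induction n with
  | zero => intro L h
            match L with
            | [] => rw [greedy]
            | _ :: _ => simp at h
  | succ n ih =>
    intro L h
    match L with
    | [] => rw [greedy]
    | x :: t =>
      rw [greedy]
      have := ih (t.filter (fun i => x + 3 ≤ i))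
        (le_trans (List.length_filter_le _ t) (by simpa using h))
      omega

theorem greedy_nonneg (L : List Int) : 0 ≤ greedy L := greedy_nonneg_aux L.length L le_rfl

-- pointwise meaning of openCond on an in-range index
theorem openCond_iff (s : List Int) (j : Nat) (hj : j < s.length) :
    openCond s (j : Int) = true ↔
      s[j]? = some 0 ∧ ∀ k : Nat, k < s.length → (j : Int) - 2 ≤ k → (k : Int) ≤ (j : Int) + 2 → s[k]? ≠ some 1 := by
  have hmax : max 0 ((j:Int) - 2) = ((j - 2 : Nat) : Int) := by omega
  have h3 : (j:Int) + 3 = ((j + 3 : Nat) : Int) := by push_cast; ring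
  rw [openCond, hmax, h3, PySem.List.slice_natCast]
  simp only [Bool.and_eq_true, beq_iff_eq, Bool.not_eq_true', ← Bool.not_eq_true,
    List.contains_iff_mem, PySem.List.pyGetD_natCast]
  constructor
  · rintro ⟨h0, h1⟩
    have h0' : s[j] = 0 := by
      simpa [List.getD_eq_getElem?_getD, List.getElem?_eq_getElem hj] using h0
    refine ⟨by rw [List.getElem?_eq_getElem hj, h0'], ?_⟩
    intro k hk hk1 hk2 hne
    apply h1
    rw [List.mem_take_iff_getElem]
    refine ⟨k - (j - 2), ?_, ?_⟩
    · simp [List.length_drop]; omega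
    · rw [List.getElem_drop]
      have : (j-2) + (k - (j-2)) = k := by omega
      simp only [this]
      simpa [List.getElem?_eq_getElem hk] using hne
  · rintro ⟨h0, h1⟩
    refine ⟨by simp [List.getD_eq_getElem?_getD, h0], ?_⟩
    intro hmem
    rw [List.mem_take_iff_getElem] at hmem
    obtain ⟨m, hm, hget⟩ := hmem
    rw [List.getElem_drop] at hget
    have hlt : j - 2 + m < s.length := by simp [List.length_drop] at hm; omega
    exact h1 (j - 2 + m) hlt (by omega) (by simp [List.length_drop] at hm; omega)
      (by rw [List.getElem?_eq_getElem hlt, hget])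

theorem mem_openListOf {s : List Int} {i : Int} (h : i ∈ openListOf s) :
    0 ≤ i ∧ i < s.length ∧ openCond s i = true := by
  rw [openListOf, List.mem_filter] at h
  obtain ⟨hm, hc⟩ := h
  rw [PySem.List.mem_pyRange_one] at hm
  simp [PySem.List.len_eq] at hm
  exact ⟨hm.1, hm.2, hc⟩

theorem pairwise_openListOf (s : List Int) : (openListOf s).Pairwise (· < ·) :=
  List.Pairwise.filter _ (PySem.List.pairwise_lt_pyRange_one _ _)

-- placing a seat at a valid position filters the open list down to the far positions
theorem openListOf_set {s : List Int} {o : Int} (ho : o ∈ openListOf s) :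
    openListOf (PySem.List.pySetD s o 1) = (openListOf s).filter (fun i => farB o i) := by
  obtain ⟨ho0, holt, hoc⟩ := mem_openListOf ho
  have hset : PySem.List.pySetD s o 1 = s.set o.toNat 1 := PySem.List.pySetD_of_nonneg s 1 ho0
  have hjo : o.toNat < s.length := by omega
  have hocast : ((o.toNat : Nat) : Int) = o := Int.toNat_of_nonneg ho0
  rw [openListOf, openListOf, hset, List.filter_filter]
  have hlen : PySem.List.len (s.set o.toNat 1) = PySem.List.len s := by
    simp [PySem.List.len_eq]
  rw [hlen]
  apply List.filter_congr
  intro i hi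
  rw [PySem.List.mem_pyRange_one] at hi
  simp only [PySem.List.len_eq] at hi
  have hi0 : 0 ≤ i := hi.1
  have hilt : i.toNat < s.length := by omega
  have hicast : ((i.toNat : Nat) : Int) = i := Int.toNat_of_nonneg hi0
  -- the validity of o in s, pointwise
  have hoiff := (openCond_iff s o.toNat hjo).mp (by rwa [hocast])
  rw [← hicast]
  have hlen' : (s.set o.toNat 1).length = s.length := by simp
  rw [Bool.eq_iff_iff, Bool.and_eq_true]
  constructor
  · intro hcond
    obtain ⟨h0', h1'⟩ := (openCond_iff (s.set o.toNat 1) i.toNat (by omega)).mp hcond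
    have hne : i.toNat ≠ o.toNat := by
      intro he
      rw [he, List.getElem?_set, if_pos rfl, if_pos hjo] at h0'
      exact (by simpa using h0')
    have hfar : farB o i = true := by
      simp only [farB, decide_eq_true_eq]
      by_contra hnf
      push_neg at hnf
      -- o is inside i's window, but (set) has a 1 there
      refine h1' o.toNat (by omega) (by omega) (by omega) ?_
      rw [List.getElem?_set, if_pos rfl, if_pos hjo]
    have hcnd : openCond s ((i.toNat : Nat) : Int) = true := by
      rw [openCond_iff s i.toNat hilt]
      refine ⟨?_, ?_⟩
      · rw [← h0', List.getElem?_set, if_neg (by omega)]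
      · intro k hk hk1 hk2 hne1
        by_cases hko : k = o.toNat
        · subst hko
          rw [hne1] at hoiff
          exact (by simpa using hoiff.1)
        · refine h1' k (by omega) hk1 hk2 ?_
          rw [List.getElem?_set, if_neg (by omega)]
          exact hne1
    rw [← hicast] at hfar
    exact ⟨hfar, hcnd⟩
  · intro hcond
    obtain ⟨hfar, hc1⟩ := hcond
    simp only [farB, decide_eq_true_eq, hicast] at hfar
    obtain ⟨h0, h1⟩ := (openCond_iff s i.toNat hilt).mp hc1
    have hne : i.toNat ≠ o.toNat := by omega
    rw [openCond_iff (s.set o.toNat 1) i.toNat (by omega)]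
    refine ⟨?_, ?_⟩
    · rw [List.getElem?_set, if_neg (by omega)]
      exact h0
    · intro k hk hk1 hk2
      rw [hlen'] at hk
      by_cases hko : k = o.toNat
      · -- o is far from i, so o cannot be in i's window
        exfalso; omega
      · rw [List.getElem?_set, if_neg (by omega)]
        exact h1 k hk hk1 hk2

-- and increases the 1-count by one
theorem count_set {s : List Int} {o : Int} (ho : o ∈ openListOf s) :
    PySem.List.count (PySem.List.pySetD s o 1) 1 = PySem.List.count s 1 + 1 := by
  obtain ⟨ho0, holt, hoc⟩ := mem_openListOf ho
  have hjo : o.toNat < s.length := by omega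
  have hocast : ((o.toNat : Nat) : Int) = o := Int.toNat_of_nonneg ho0
  have h0 : s[o.toNat] = 0 := by
    have := ((openCond_iff s o.toNat hjo).mp (by rwa [hocast])).1
    rw [List.getElem?_eq_getElem hjo] at this
    simpa using this
  rw [PySem.List.pySetD_of_nonneg s 1 ho0, PySem.List.count_eq, PySem.List.count_eq,
    List.count_set hjo]
  simp [h0]

theorem filter_mono_length {p : Int → Bool} {t : List Int} {n : Nat} (h : t.length ≤ n) :
    (t.filter p).length ≤ n := le_trans (List.length_filter_le _ t) h

-- greedy is monotone under sublists (of a sorted list)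
theorem greedy_mono_aux : ∀ (n : Nat) (L L' : List Int), L.length ≤ n → L.Pairwise (· < ·) →
    List.Sublist L' L → greedy L' ≤ greedy L := by
  intro n
  induction n with
  | zero =>
    intro L L' hn _ hs
    have : L = [] := List.eq_nil_of_length_eq_zero (Nat.le_zero.mp hn)
    subst this
    rw [List.sublist_nil.mp hs]
  | succ n ih =>
    intro L L' hn hp hs
    match L, hs with
    | _, List.Sublist.slnil => rw [greedy]
    | h :: t, List.Sublist.cons _ hs' =>
      have hlt : t.length ≤ n := by simpa using hn
      have hpt : t.Pairwise (· < ·) := hp.of_cons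
      have h1 : greedy L' ≤ greedy t := ih t L' hlt hpt hs'
      refine h1.trans ?_
      -- greedy t ≤ greedy (h :: t)
      match t, hpt, hp, hlt with
      | [], _, _, _ =>
        rw [greedy, greedy]
        have := greedy_nonneg (([] : List Int).filter (fun i => h + 3 ≤ i))
        omega
      | a :: t2, hpt2, hp2, hlt2 =>
        rw [greedy, greedy]
        have hha : h < a := (List.pairwise_cons.mp hp2).1 a (List.mem_cons_self ..)
        by_cases hc : h + 3 ≤ a
        · -- a survives the (h+3 ≤ ·) filter
          rw [List.filter_cons_of_pos (by simpa using hc), greedy, List.filter_filter]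
          have heq : (t2.filter (fun i => a + 3 ≤ i))
              = t2.filter (fun a_1 => decide (a + 3 ≤ a_1) && decide (h + 3 ≤ a_1)) := by
            apply List.filter_congr
            intro x hx
            by_cases hax : a + 3 ≤ x
            · simp [hax]; omega
            · simp [hax]
          rw [← heq]
          omega
        · rw [List.filter_cons_of_neg (by simpa using hc)]
          have hsub : List.Sublist (t2.filter (fun i => a + 3 ≤ i)) (t2.filter (fun i => h + 3 ≤ i)) :=
            List.monotone_filter_right t2 (by intro x hx; simp at hx ⊢; omega)
          have := ih (t2.filter (fun i => h + 3 ≤ i)) (t2.filter (fun i => a + 3 ≤ i))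
            (filter_mono_length (by simpa using Nat.le_of_succ_le hn))
            (hpt2.of_cons.filter _) hsub
          omega
    | h :: t, @List.Sublist.cons₂ _ L1 _ _ hs' =>
      rw [greedy, greedy]
      have := ih (t.filter (fun i => h + 3 ≤ i)) (L1.filter (fun i => h + 3 ≤ i))
        (filter_mono_length (by simpa using hn)) (hp.of_cons.filter _) (hs'.filter _)
      omega

theorem greedy_mono {L L' : List Int} (hp : L.Pairwise (· < ·)) (hs : List.Sublist L' L) :
    greedy L' ≤ greedy L := greedy_mono_aux L.length L L' le_rfl hp hs

-- committing to the head is exactly greedy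
theorem greedy_head {h : Int} {t : List Int} (hp : (h :: t).Pairwise (· < ·)) :
    greedy (h :: t) = 1 + greedy ((h :: t).filter (fun i => farB h i)) := by
  rw [greedy, List.filter_cons]
  have hfh : farB h h = false := by simp only [farB, decide_eq_false_iff_not]; omega
  rw [hfh]
  simp only [Bool.false_eq_true, if_false]
  congr 2
  apply (List.filter_congr _).symm
  intro x hx
  have hlt : h < x := (List.pairwise_cons.mp hp).1 x hx
  simp [farB]
  omega

-- exchange: committing to any o ∈ L never beats greedy
theorem greedy_exchange_aux : ∀ (n : Nat) (L : List Int), L.length ≤ n → L.Pairwise (· < ·) →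
    ∀ o ∈ L, 1 + greedy (L.filter (fun i => farB o i)) ≤ greedy L := by
  intro n
  induction n with
  | zero =>
    intro L hn _ o hoL
    rw [List.eq_nil_of_length_eq_zero (Nat.le_zero.mp hn)] at hoL
    simp at hoL
  | succ n ih =>
    intro L hn hp o hoL
    match L, hoL with
    | h :: t, hoL =>
      rcases List.mem_cons.mp hoL with he | hot
      · subst he
        rw [← greedy_head hp]
      · have hho : h < o := (List.pairwise_cons.mp hp).1 o hot
        by_cases hc : h + 3 ≤ o
        · -- h survives the farB o filter
          rw [List.filter_cons_of_pos (by simp only [farB, decide_eq_true_eq]; omega), greedy, greedy,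
            List.filter_filter]
          have heq : ((t.filter (fun i => h + 3 ≤ i)).filter (fun i => farB o i))
              = t.filter (fun a => decide (h + 3 ≤ a) && farB o a) := List.filter_filter.trans
            (List.filter_congr (by intro x hx; simp [Bool.and_comm]))
          rw [← heq]
          have := ih (t.filter (fun i => h + 3 ≤ i)) (filter_mono_length (by simpa using hn))
            (hp.of_cons.filter _) o (List.mem_filter.mpr ⟨hot, by simpa using hc⟩)
          omega
        · -- h is near o and is dropped; remaining far elements all lie at o+3 or beyond
          rw [List.filter_cons_of_neg (by simp only [farB, decide_eq_true_eq]; omega)]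
          have heq : t.filter (fun i => farB o i) = t.filter (fun i => o + 3 ≤ i) := by
            apply List.filter_congr
            intro x hx
            have : h < x := (List.pairwise_cons.mp hp).1 x hx
            simp [farB]
            omega
          rw [heq, greedy]
          have hsub : List.Sublist (t.filter (fun i => o + 3 ≤ i)) (t.filter (fun i => h + 3 ≤ i)) :=
            List.monotone_filter_right t (by intro x hx; simp at hx ⊢; omega)
          have := greedy_mono (hp.of_cons.filter _) hsub
          omega

theorem greedy_exchange {L : List Int} (hp : L.Pairwise (· < ·)) {o : Int} (ho : o ∈ L) :
    1 + greedy (L.filter (fun i => farB o i)) ≤ greedy L :=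
  greedy_exchange_aux L.length L le_rfl hp o ho

-- every leaf of A's search tree is at most count + greedy
theorem fillOpen_le : ∀ (fuel : Nat) (s openS : List Int),
    (∀ o ∈ openS, o ∈ openListOf s) →
    ∀ x ∈ fillOpen fuel s openS, x ≤ PySem.List.count s 1 + greedy (openListOf s) := by
  intro fuel
  induction fuel with
  | zero => intro s openS _ x hx; simp [fillOpen] at hx
  | succ fuel ih =>
    intro s openS hsub x hx
    match openS with
    | [] =>
      simp [fillOpen] at hx
      subst hx
      rw [PySem.List.count_eq]
      have := greedy_nonneg (openListOf s)
      omega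
    | o :: rest =>
      rw [fillOpen] at hx
      rcases List.mem_append.mp hx with hl | hr
      · exact ih s rest (fun o' ho' => hsub o' (List.mem_cons_of_mem _ ho')) x hl
      · have hoL : o ∈ openListOf s := hsub o (List.mem_cons_self ..)
        have hx' := ih (PySem.List.pySetD s o 1) (openListOf (PySem.List.pySetD s o 1))
          (fun o' ho' => ho') x hr
        rw [openListOf_set hoL, count_set hoL] at hx'
        have := greedy_exchange (pairwise_openListOf s) hoL
        omega

-- and the greedy value is attained on some leaf (with enough fuel)
theorem fillOpen_mem : ∀ (fuel : Nat) (s : List Int), (openListOf s).length < fuel →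
    PySem.List.count s 1 + greedy (openListOf s) ∈ fillOpen fuel s (openListOf s) := by
  intro fuel
  induction fuel with
  | zero => intro s h; omega
  | succ fuel ih =>
    intro s hlen
    cases hL : openListOf s with
    | nil =>
      rw [fillOpen]
      rw [show greedy ([] : List Int) = 0 from by rw [greedy]]
      simp
    | cons h t =>
      have hpc : (h :: t).Pairwise (· < ·) := by rw [← hL]; exact pairwise_openListOf s
      rw [fillOpen]
      apply List.mem_append_right
      have hoL : h ∈ openListOf s := by rw [hL]; exact List.mem_cons_self ..
      have hset : openListOf (PySem.List.pySetD s h 1) = (openListOf s).filter (fun i => farB h i) :=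
        openListOf_set hoL
      have hlt : (openListOf (PySem.List.pySetD s h 1)).length < fuel := by
        rw [hset, hL, List.filter_cons_of_neg (by simp only [farB, decide_eq_true_eq]; omega)]
        have := List.length_filter_le (fun i => farB h i) t
        rw [hL] at hlen
        simp at hlen ⊢
        omega
      have key : ((PySem.List.count s 1 : Int) + greedy (h :: t))
          = ((PySem.List.count (PySem.List.pySetD s h 1) 1 : Int)
            + greedy (openListOf (PySem.List.pySetD s h 1))) := by
        rw [count_set hoL, hset, hL, greedy_head hpc]
        push_cast
        ring
      rw [key]
      exact ih _ hlt

-- a fold that ignores positions failing p can be run on the filtered list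
theorem foldl_skip (p : Int → Bool) (f : (Int × Int) → Int → (Int × Int))
    (hf : ∀ st i, p i = false → f st i = st) :
    ∀ (L : List Int) (init : Int × Int), L.foldl f init = (L.filter p).foldl f init := by
  intro L
  induction L with
  | nil => intro init; rfl
  | cons h t ih =>
    intro init
    by_cases hp : p h = true
    · rw [List.filter_cons_of_pos hp]; exact ih _
    · rw [List.filter_cons_of_neg (by simpa using hp), List.foldl_cons,
        hf init h (by simpa using hp)]
      exact ih _

-- B's greedy fold over a sorted open list computes greedy
theorem foldB_eq : ∀ (n : Nat) (L : List Int), L.length ≤ n → L.Pairwise (· < ·) →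
    ∀ (c last : Int),
    (L.foldl (fun (st : Int × Int) i => if 3 ≤ i - st.2 then (st.1 + 1, i) else st) (c, last)).1
      = c + greedy (L.filter (fun i => last + 3 ≤ i)) := by
  intro n
  induction n with
  | zero =>
    intro L hn _ c last
    rw [List.eq_nil_of_length_eq_zero (Nat.le_zero.mp hn)]
    simp only [List.filter_nil, List.foldl_nil]
    rw [show greedy ([] : List Int) = 0 from by rw [greedy]]
    simp
  | succ n ih =>
    intro L hn hp c last
    match L with
    | [] =>
      simp only [List.filter_nil, List.foldl_nil]
      rw [show greedy ([] : List Int) = 0 from by rw [greedy]]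
      simp
    | h :: t =>
      rw [List.foldl_cons]
      have hlt : t.length ≤ n := by simpa using hn
      by_cases hc : 3 ≤ h - last
      · rw [if_pos hc, ih t hlt hp.of_cons (c + 1) h,
          List.filter_cons_of_pos (by simp; omega), greedy, List.filter_filter]
        have heq : (t.filter (fun i => h + 3 ≤ i))
            = t.filter (fun a => decide (h + 3 ≤ a) && decide (last + 3 ≤ a)) := by
          apply List.filter_congr
          intro x hx
          by_cases hax : h + 3 ≤ x
          · simp [hax]; omega
          · simp [hax]
        rw [← heq]
        omega
      · rw [if_neg hc, ih t hlt hp.of_cons c last,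
          List.filter_cons_of_neg (by simp; omega)]

-- both programs compute greedy (openListOf s)
theorem maximum_seating_eq (s : List Int) : maximum_seating s = greedy (openListOf s) := by
  rw [maximum_seating]
  have hlen : (openListOf s).length < (s.length + 2) * (s.length + 2) := by
    have h1 : (openListOf s).length ≤ s.length := by
      have := List.length_filter_le (fun i => openCond s i) (PySem.List.pyRange 0 (PySem.List.len s) 1)
      rw [PySem.List.length_pyRange_one] at this
      simp [PySem.List.len_eq] at this
      exact this
    have h2 : s.length < (s.length + 2) * (s.length + 2) := by nlinarith
    omega
  have hmem := fillOpen_mem ((s.length + 2) * (s.length + 2)) s hlen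
  have hle := fillOpen_le ((s.length + 2) * (s.length + 2)) s (openListOf s) (fun o ho => ho)
  set fill := fillOpen ((s.length + 2) * (s.length + 2)) s (openListOf s) with hfill
  have hne : fill ≠ [] := List.ne_nil_of_mem hmem
  obtain ⟨mx, hmx⟩ : ∃ mx, PySem.List.max? fill (fun x => x) = some mx := by
    cases h : PySem.List.max? fill (fun x => x) with
    | none => exact absurd ((PySem.List.max?_eq_none_iff _ _).mp h) hne
    | some m => exact ⟨m, rfl⟩
  have hmx1 : mx ≤ PySem.List.count s 1 + greedy (openListOf s) := hle mx (PySem.List.max?_mem hmx)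
  have hmx2 : PySem.List.count s 1 + greedy (openListOf s) ≤ mx := PySem.List.max?_isMax hmx _ hmem
  simp only [hmx, Option.getD_some]
  omega

theorem maximum_seating_alt_eq (s : List Int) : maximum_seating_alt s = greedy (openListOf s) := by
  rw [maximum_seating_alt]
  rw [foldl_skip (fun i => openCond s i) _
    (by intro st i hpi; simp [hpi]) _ (0, -3)]
  rw [PySem.List.foldl_congr_mem _ _
    (fun (st : Int × Int) i => if 3 ≤ i - st.2 then (st.1 + 1, i) else st) (0, -3)
    (by
      intro acc x hx
      have hc := (mem_openListOf hx).2.2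
      simp [hc])]
  rw [show List.filter (fun i => openCond s i) (PySem.List.pyRange 0 (PySem.List.len s) 1) = openListOf s from rfl]
  rw [foldB_eq (openListOf s).length (openListOf s) le_rfl (pairwise_openListOf s) 0 (-3)]
  have : (openListOf s).filter (fun i => -3 + 3 ≤ i) = openListOf s :=
    List.filter_eq_self.mpr (by intro a ha; have := (mem_openListOf ha).1; simp; omega)
  rw [this]
  omega

-- ===== VERDICT (by name: the statement is the Claim_ definition above) =====
theorem maximum_seating_spec : Claim_equal_maximum_seating := by
  intro seats _
  unfold Spec_maximum_seating
  rw [maximum_seating_eq, maximum_seating_alt_eq]
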